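-- pv_equiv track=rewrite | github.com/Jianxun/ASDL | src/asdl/patterns/verify.py | collect_literal_collisions
-- ===== SOURCE A (Python) =====
-- from typing import Dict, Iterable, List, Sequence, Tuple
--
-- def collect_literal_collisions(
--     entries: Iterable[Tuple[str, str]],
-- ) -> Dict[str, List[str]]:
--     """Group literal collision candidates by literal name.
--
--     Args:
--         entries: Iterable of (literal, token) pairs.
--
--     Returns:
--         Mapping of literal name to ordered token list for collisions.
--     """
--     collisions: Dict[str, List[str]] = {}
--     for literal, token in entries:
--         collisions.setdefault(literal, []).append(token)
--     return {
--         literal: tokens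
--         for literal, tokens in collisions.items()
--         if len(tokens) > 1
--     }
-- ===== SOURCE B (Python) =====
-- from typing import Dict, Iterable, List, Tuple
--
--
-- def collect_literal_collisions(
--     entries: Iterable[Tuple[str, str]],
-- ) -> Dict[str, List[str]]:
--     """Count literals first, then collect tokens only for colliding literals."""
--     pairs = list(entries)
--     counts: Dict[str, int] = {}
--     for literal, _ in pairs:
--         counts[literal] = counts.get(literal, 0) + 1
--     collisions: Dict[str, List[str]] = {}
--     for literal, token in pairs:
--         if counts[literal] > 1:
--             collisions.setdefault(literal, []).append(token)
--     return collisions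
-- ===== Notes on version B (the rewrite author's own statement) =====
-- stated objective: alternative
-- what changed: A groups every token list in a dict and then filters the items by length; B first counts each literal's occurrences in one pass and then collects tokens only for literals whose count exceeds one, never building the non-colliding groups.
import Mathlib
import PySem

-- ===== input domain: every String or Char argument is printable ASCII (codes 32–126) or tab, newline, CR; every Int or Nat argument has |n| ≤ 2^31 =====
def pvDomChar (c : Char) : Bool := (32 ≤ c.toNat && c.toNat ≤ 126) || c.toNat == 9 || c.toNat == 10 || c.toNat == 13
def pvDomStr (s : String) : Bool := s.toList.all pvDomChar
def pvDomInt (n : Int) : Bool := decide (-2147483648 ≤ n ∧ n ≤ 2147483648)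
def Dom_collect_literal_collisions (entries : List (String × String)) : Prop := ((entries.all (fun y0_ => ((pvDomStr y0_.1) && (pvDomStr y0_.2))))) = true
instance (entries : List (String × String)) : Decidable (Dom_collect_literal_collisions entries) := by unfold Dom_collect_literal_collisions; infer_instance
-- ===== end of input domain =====

-- B replaces A's group-everything-then-filter with a count-literals-first pass that only ever
-- collects tokens for colliding literals (objective: alternative decomposition, same output).

-- ===== PORT A =====
def collect_literal_collisions (entries : List (String × String)) : List (String × List String) :=
  ((entries.foldl (fun d p => d.modify p.1 [] (fun ts => ts ++ [p.2])) PySem.Dict.empty).items.foldl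
      (fun d p => if 1 < p.2.length then d.insert p.1 p.2 else d) PySem.Dict.empty).items

-- ===== PORT B =====
def collect_literal_collisions_alt (entries : List (String × String)) : List (String × List String) :=
  let counts : PySem.Dict String Int :=
    entries.foldl (fun d p => d.insert p.1 (d.getD p.1 0 + 1)) PySem.Dict.empty
  (entries.foldl
      (fun d p => if 1 < counts.getD p.1 0 then d.modify p.1 [] (fun ts => ts ++ [p.2]) else d)
      PySem.Dict.empty).items


-- ===== PRECONDITION & SPEC =====
def Spec_collect_literal_collisions (entries : List (String × String)) (out : List (String × List String)) : Prop := out = collect_literal_collisions_alt entries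
instance (entries : List (String × String)) (out : List (String × List String)) : Decidable (Spec_collect_literal_collisions entries out) := by unfold Spec_collect_literal_collisions; infer_instance

-- ===== CLAIM (what is proved, stated in full; the proofs are below) =====
def Claim_equal_collect_literal_collisions : Prop := ∀ (entries : List (String × String)), Dom_collect_literal_collisions entries → Spec_collect_literal_collisions entries (collect_literal_collisions entries)

-- ===== LEMMAS AND PROOFS =====

theorem pv_ofList_filter (q : String → Bool) (ks : List String) :
    PySem.Set.ofList (ks.filter q) = (PySem.Set.ofList ks).filter q := by
  induction ks with
  | nil => rfl
  | cons x xs ih =>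
    by_cases hx : q x = true
    · simp only [List.filter_cons, hx, if_true, PySem.Set.ofList_cons, ih,
        PySem.Set.discard, List.filter_filter]
      refine congrArg (x :: ·) (List.filter_congr ?_)
      intro y _; rw [Bool.and_comm]
    · simp only [List.filter_cons, hx, if_false, Bool.false_eq_true,
        PySem.Set.ofList_cons, ih, PySem.Set.discard, List.filter_filter]
      refine (List.filter_congr ?_).symm
      intro y _
      rcases Bool.eq_false_or_eq_true (q y) with h | h
      · have hne : y ≠ x := fun e => hx (e ▸ h)
        simp [h, hne]
      · simp [h]

theorem pv_foldl_guard {α β : Type} (P : α → Prop) [DecidablePred P] (f : β → α → β)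
    (l : List α) (init : β) :
    l.foldl (fun acc x => if P x then f acc x else acc) init
      = (l.filter (fun x => decide (P x))).foldl f init := by
  induction l generalizing init with
  | nil => rfl
  | cons x xs ih => by_cases h : P x <;> simp [h, ih]

-- group helper: the dict both programs build from a pair list
def pvGroup (l : List (String × String)) : PySem.Dict String (List String) :=
  l.foldl (fun d p => d.modify p.1 [] (fun ts => ts ++ [p.2])) PySem.Dict.empty

theorem pvGroup_keys (l : List (String × String)) :
    (pvGroup l).keys = PySem.Set.ofList (l.map Prod.fst) := by
  have h := PySem.Dict.keys_foldl_modify_key l Prod.fst []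
    (fun _ p => (fun ts => ts ++ [p.2])) PySem.Dict.empty
  simpa [pvGroup, PySem.Set.update_nil_left] using h

theorem pvGroup_keys_nodup (l : List (String × String)) : (pvGroup l).keys.Nodup := by
  rw [pvGroup_keys]; exact PySem.Set.nodup_ofList _

theorem pvGroup_getD (l : List (String × String)) (k : String) :
    (pvGroup l).getD k [] = (l.filter (fun p => p.1 == k)).map (fun p => p.2) := by
  have h := PySem.Dict.getD_foldl_modify_append l PySem.Dict.empty k
  simpa [pvGroup] using h

theorem pvGroup_items (l : List (String × String)) :
    (pvGroup l).items
      = ((PySem.Set.ofList (l.map Prod.fst)).map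
          (fun k => (k, (l.filter (fun p => p.1 == k)).map (fun p => p.2)))) := by
  rw [PySem.Dict.items_eq_map_keys _ (pvGroup_keys_nodup l) [], pvGroup_keys]
  exact List.map_congr_left (fun k _ => by rw [pvGroup_getD])

-- A's result: filter the grouped items by token-list length
theorem pvA_eq (entries : List (String × String)) :
    collect_literal_collisions entries
      = ((pvGroup entries).items.filter (fun p => decide (1 < p.2.length))) := by
  show ((pvGroup entries).items.foldl
      (fun d p => if 1 < p.2.length then d.insert p.1 p.2 else d) PySem.Dict.empty).items = _
  rw [pv_foldl_guard (fun p : String × List String => 1 < p.2.length)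
    (fun d p => d.insert p.1 p.2) (pvGroup entries).items PySem.Dict.empty]
  rw [PySem.Dict.items_foldl_insert_fresh _ Prod.fst Prod.snd PySem.Dict.empty
    (by intro a _; simp) ?nd]
  · simp [PySem.Dict.empty]
  case nd =>
    have hsub : ((pvGroup entries).items.filter (fun p => decide (1 < p.2.length))).Sublist
        (pvGroup entries).items := List.filter_sublist
    have := (hsub.map Prod.fst).nodup (pvGroup_keys_nodup entries)
    simpa using this

-- B's result: group only the entries whose literal occurs more than once
theorem pvB_eq (entries : List (String × String)) :
    collect_literal_collisions_alt entries
      = (pvGroup (entries.filter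
          (fun p => decide (1 < (entries.map Prod.fst).count p.1)))).items := by
  have hc : ∀ k : String,
      (entries.foldl (fun d p => d.insert p.1 (d.getD p.1 0 + 1))
          (PySem.Dict.empty : PySem.Dict String Int)).getD k 0
        = ((entries.map Prod.fst).count k : ℤ) := by
    intro k
    rw [show (entries.foldl (fun d p => d.insert p.1 (d.getD p.1 0 + 1))
          (PySem.Dict.empty : PySem.Dict String Int))
        = (entries.map Prod.fst).foldl (fun d x => d.insert x (d.getD x 0 + 1))
            PySem.Dict.empty from
      (List.foldl_map (f := Prod.fst)
        (g := fun (d : PySem.Dict String Int) x => d.insert x (d.getD x 0 + 1))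
        (l := entries) (init := PySem.Dict.empty)).symm]
    rw [PySem.Dict.getD_foldl_insert_add_one]
    simp
  have hstep : (entries.foldl
      (fun d p => if 1 < (entries.foldl (fun d p => d.insert p.1 (d.getD p.1 0 + 1))
          (PySem.Dict.empty : PySem.Dict String Int)).getD p.1 0
        then d.modify p.1 [] (fun ts => ts ++ [p.2]) else d)
      (PySem.Dict.empty : PySem.Dict String (List String)))
      = (entries.filter (fun p => decide (1 < (entries.foldl
            (fun d p => d.insert p.1 (d.getD p.1 0 + 1))
            (PySem.Dict.empty : PySem.Dict String Int)).getD p.1 0))).foldl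
          (fun d p => d.modify p.1 [] (fun ts => ts ++ [p.2])) PySem.Dict.empty :=
    pv_foldl_guard _ _ _ _
  show (entries.foldl
      (fun d p => if 1 < (entries.foldl (fun d p => d.insert p.1 (d.getD p.1 0 + 1))
          (PySem.Dict.empty : PySem.Dict String Int)).getD p.1 0
        then d.modify p.1 [] (fun ts => ts ++ [p.2]) else d) PySem.Dict.empty).items = _
  rw [hstep, pvGroup]
  congr 2
  apply List.filter_congr
  intro p _
  rw [hc p.1]
  simp

theorem pv_count_key (entries : List (String × String)) (k : String) :
    (entries.map Prod.fst).count k = List.countP (fun p => p.1 == k) entries := by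
  rw [List.count_eq_countP, List.countP_map]
  rfl

theorem pv_main (entries : List (String × String)) :
    collect_literal_collisions entries = collect_literal_collisions_alt entries := by
  rw [pvA_eq, pvB_eq, pvGroup_items, pvGroup_items, List.filter_map]
  -- the filtered entry list's literals, deduplicated
  have hkeys : PySem.Set.ofList
        ((entries.filter (fun p => decide (1 < (entries.map Prod.fst).count p.1))).map Prod.fst)
      = (PySem.Set.ofList (entries.map Prod.fst)).filter
          (fun k => decide (1 < (entries.map Prod.fst).count k)) := by
    rw [show (entries.filter (fun p => decide (1 < (entries.map Prod.fst).count p.1))).map Prod.fst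
        = (entries.map Prod.fst).filter (fun k => decide (1 < (entries.map Prod.fst).count k)) from
      (List.filter_map (f := Prod.fst)
        (p := fun k => decide (1 < (entries.map Prod.fst).count k)) (l := entries)).symm]
    exact pv_ofList_filter _ _
  rw [hkeys]
  -- the two key filters agree: token-list length = literal count
  have hlen : ∀ k : String,
      ((entries.filter (fun p => p.1 == k)).map (fun p => p.2)).length
        = (entries.map Prod.fst).count k := by
    intro k
    rw [List.length_map, pv_count_key, List.countP_eq_length_filter]
  have hfilt : (PySem.Set.ofList (entries.map Prod.fst)).filter
        ((fun p : String × List String => decide (1 < p.2.length)) ∘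
          (fun k => (k, (entries.filter (fun p => p.1 == k)).map (fun p => p.2))))
      = (PySem.Set.ofList (entries.map Prod.fst)).filter
          (fun k => decide (1 < (entries.map Prod.fst).count k)) := by
    apply List.filter_congr
    intro k _
    simp only [Function.comp]
    rw [hlen k]
  rw [hfilt]
  -- per surviving key, the grouped token lists agree
  apply List.map_congr_left
  intro k hk
  have hq : decide (1 < (entries.map Prod.fst).count k) = true := (List.mem_filter.mp hk).2
  refine congrArg (fun ts => (k, ts)) ?_
  rw [List.filter_filter]
  refine congrArg (List.map _) (List.filter_congr ?_).symm
  intro p _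
  rcases Bool.eq_false_or_eq_true (p.1 == k) with h | h
  · have hpk : p.1 = k := by simpa using h
    simp [hpk, hq]
  · simp [h]

-- ===== VERDICT (by name: the statement is the Claim_ definition above) =====
theorem collect_literal_collisions_spec : Claim_equal_collect_literal_collisions := by
  intro entries _
  exact pv_main entries
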